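-- pv_equiv track=rewrite | github.com/spriteboysz/LeetcodePython | LCP/LCS 01. 下载插件.py | leastMinutes
-- ===== SOURCE A (Python) =====
-- def leastMinutes(n: int) -> int:
--     minimum, speed = 1, 1
--     while n > 0:
--         if n > speed:
--             minimum += 1
--             speed *= 2
--         else:
--             return minimum
-- ===== SOURCE B (Python) =====
-- def leastMinutes(n: int) -> int:
--     return (n - 1).bit_length() + 1
-- ===== Notes on version B (the rewrite author's own statement) =====
-- stated objective: simpler
-- what changed: Replaced the speed-doubling while loop with the closed form (n-1).bit_length() + 1, a single arithmetic expression with no loop or accumulator.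
-- outside the precondition, e.g. on leastMinutes(0): A returns None, B returns 2; on leastMinutes(-3): A returns None, B returns 4
import Mathlib
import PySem

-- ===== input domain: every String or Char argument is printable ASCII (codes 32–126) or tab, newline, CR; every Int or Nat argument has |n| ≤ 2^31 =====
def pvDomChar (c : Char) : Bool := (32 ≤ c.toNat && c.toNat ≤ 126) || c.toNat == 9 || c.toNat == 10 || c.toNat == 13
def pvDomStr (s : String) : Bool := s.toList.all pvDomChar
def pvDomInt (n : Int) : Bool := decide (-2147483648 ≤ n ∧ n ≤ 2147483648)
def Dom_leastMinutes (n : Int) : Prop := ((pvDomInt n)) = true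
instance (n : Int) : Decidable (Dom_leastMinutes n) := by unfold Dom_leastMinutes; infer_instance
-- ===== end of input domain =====

-- B replaces A's speed-doubling loop with the closed form (n-1).bit_length() + 1 (objective: simpler).

-- ===== PORT A =====
-- the while loop; fuel is only a totality device (speed doubles, so n.natAbs steps always suffice
-- for n ≥ 1; the 0 at fuel exhaustion and at loop fall-through is never reached inside Pre_).
def leastMinutesLoop : Nat → Int → Int → Int → Int
  | 0, _, _, _ => 0
  | f + 1, n, minimum, speed =>
    if n > 0 then
      if n > speed then leastMinutesLoop f n (minimum + 1) (speed * 2)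
      else minimum
    else 0

def leastMinutes (n : Int) : Int := leastMinutesLoop (n.natAbs + 1) n 1 1

-- ===== PORT B =====
-- Python int.bit_length (uses the absolute value; bit_length 0 = 0)
def pyBitLength (k : Int) : Int := if k = 0 then 0 else ((Nat.log2 k.natAbs : Nat) : Int) + 1

def leastMinutes_alt (n : Int) : Int := pyBitLength (n - 1) + 1

-- ===== PRECONDITION & SPEC =====
-- Pre_ excludes n ≤ 0, where A's loop body never runs and A falls through returning None, not an int.
def Pre_leastMinutes (n : Int) : Prop := 1 ≤ n
instance (n : Int) : Decidable (Pre_leastMinutes n) := by unfold Pre_leastMinutes; infer_instance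
def pvWitness_leastMinutes : Int := (5)

def Spec_leastMinutes (n : Int) (out : Int) : Prop := out = leastMinutes_alt n
instance (n : Int) (out : Int) : Decidable (Spec_leastMinutes n out) := by unfold Spec_leastMinutes; infer_instance

-- ===== CLAIM (what is proved, stated in full; the proofs are below) =====
def Claim_equal_leastMinutes : Prop := ∀ (n : Int), Dom_leastMinutes n → Pre_leastMinutes n → Spec_leastMinutes n (leastMinutes n)

-- ===== LEMMAS AND PROOFS =====

-- bit_length of a Nat
def bl0 (a : Nat) : Nat := if a = 0 then 0 else Nat.log2 a + 1

lemma bl0_le_iff (a k : Nat) : bl0 a ≤ k ↔ a < 2 ^ k := by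
  unfold bl0
  split_ifs with h
  · subst h
    simp
  · rw [Nat.succ_le_iff]
    exact Nat.log2_lt h

lemma loop_eq (f : Nat) : ∀ (k : Nat) (n m : Int), 1 ≤ n → n ≤ ((2 ^ (k + f) : Nat) : Int) →
    leastMinutesLoop (f + 1) n m ((2 ^ k : Nat) : Int) = m + max 0 ((bl0 (n - 1).natAbs : Int) - k) := by
  induction f with
  | zero =>
    intro k n m h1 h2
    rw [Nat.add_zero] at h2
    have hb : bl0 (n - 1).natAbs ≤ k := by
      rw [bl0_le_iff]
      generalize hp : (2 ^ k : Nat) = p at *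
      omega
    have hle : ¬ n > ((2 ^ k : Nat) : Int) := by omega
    unfold leastMinutesLoop
    simp only [if_pos (show n > 0 by omega), if_neg hle]
    omega
  | succ f ih =>
    intro k n m h1 h2
    unfold leastMinutesLoop
    simp only [if_pos (show n > 0 by omega)]
    by_cases hc : n > ((2 ^ k : Nat) : Int)
    · rw [if_pos hc]
      have hsp : ((2 ^ k : Nat) : Int) * 2 = ((2 ^ (k + 1) : Nat) : Int) := by
        push_cast; ring
      rw [hsp, ih (k + 1) n (m + 1) h1 (by rw [show k + 1 + f = k + (f + 1) by omega]; exact h2)]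
      have hb : ¬ bl0 (n - 1).natAbs ≤ k := by
        rw [bl0_le_iff]
        generalize hp : (2 ^ k : Nat) = p at *
        omega
      omega
    · rw [if_neg hc]
      have hb : bl0 (n - 1).natAbs ≤ k := by
        rw [bl0_le_iff]
        generalize hp : (2 ^ k : Nat) = p at *
        omega
      omega

lemma alt_eq_bl0 (n : Int) (h1 : 1 ≤ n) :
    leastMinutes_alt n = (bl0 (n - 1).natAbs : Int) + 1 := by
  unfold leastMinutes_alt pyBitLength bl0
  by_cases h : n - 1 = 0
  · simp [h]
  · rw [if_neg h, if_neg (show ¬ (n - 1).natAbs = 0 by omega)]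
    push_cast; ring

-- ===== VERDICT (by name: the statement is the Claim_ definition above) =====
theorem leastMinutes_spec : Claim_equal_leastMinutes := by
  intro n _ hpre
  unfold Spec_leastMinutes leastMinutes
  have hpow : n ≤ ((2 ^ (0 + n.natAbs) : Nat) : Int) := by
    rw [Nat.zero_add]
    have := Nat.lt_two_pow_self (n := n.natAbs)
    omega
  have h := loop_eq n.natAbs 0 n 1 hpre hpow
  rw [show ((2 ^ 0 : Nat) : Int) = 1 by norm_num] at h
  rw [h, alt_eq_bl0 n hpre]
  omega
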